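-- pv_equiv track=rewrite | github.com/AhmedMujtabaIBM/guardium-supported-datasources-v2 | consolidation-script2/Helpers/helpers.py | has_duplicates_2d_lst
-- ===== SOURCE A (Python) =====
-- from typing import List,Callable,Dict,Any
--
-- def has_duplicates_2d_lst(list_of_lists:List[List[str]]) -> bool:
--     """
--     Checks a 2d list for duplicate values
--     """
--     seen = set()
--     for sublist in list_of_lists:
--         for item in sublist:
--             if item in seen:
--                 return True
--             seen.add(item)
--     return False
-- ===== SOURCE B (Python) =====
-- from typing import List
--
-- def has_duplicates_2d_lst(list_of_lists: List[List[str]]) -> bool: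
--     """Checks a 2d list for duplicate values (sort, then scan adjacent pairs)."""
--     flat = sorted(item for sublist in list_of_lists for item in sublist)
--     return any(a == b for a, b in zip(flat, flat[1:]))
-- ===== Notes on version B (the rewrite author's own statement) =====
-- stated objective: alternative
-- what changed: Replaced A's incremental hash-set membership scan with early return by a sort-based algorithm: flatten, sort the items, and detect a duplicate as an equal adjacent pair in the sorted order.
import Mathlib
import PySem

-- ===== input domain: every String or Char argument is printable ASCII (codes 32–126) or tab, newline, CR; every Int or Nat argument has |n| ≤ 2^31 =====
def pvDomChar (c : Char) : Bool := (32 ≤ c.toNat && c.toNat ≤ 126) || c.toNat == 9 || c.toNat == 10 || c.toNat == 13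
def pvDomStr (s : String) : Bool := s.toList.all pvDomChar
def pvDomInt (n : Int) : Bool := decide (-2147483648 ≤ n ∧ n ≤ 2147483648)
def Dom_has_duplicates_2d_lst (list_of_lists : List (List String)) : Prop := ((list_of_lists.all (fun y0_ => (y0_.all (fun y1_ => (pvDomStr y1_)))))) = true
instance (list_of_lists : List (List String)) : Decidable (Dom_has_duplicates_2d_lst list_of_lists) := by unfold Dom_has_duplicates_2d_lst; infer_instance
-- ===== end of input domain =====

-- B replaces A's incremental seen-set scan by a different algorithm: flatten, sort, and look for an equal ADJACENT pair (return value only).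
-- ===== PORT A =====
-- inner loop: walks one sublist, none = early `return True`, some = updated seen
def hdInnerA (seen : PySem.Set String) : List String → Option (PySem.Set String)
  | [] => some seen
  | item :: rest =>
    if PySem.Set.contains seen item then none
    else hdInnerA (PySem.Set.add seen item) rest

-- outer loop over the sublists
def hdOuterA (seen : PySem.Set String) : List (List String) → Bool
  | [] => false
  | sublist :: rest =>
    match hdInnerA seen sublist with
    | none => true
    | some seen' => hdOuterA seen' rest

def has_duplicates_2d_lst (list_of_lists : List (List String)) : Bool :=
  hdOuterA PySem.Set.empty list_of_lists

-- ===== PORT B =====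
-- any(a == b for a, b in zip(flat, flat[1:])): scan of adjacent pairs
def hdAdjB : List String → Bool
  | x :: y :: t => (x == y) || hdAdjB (y :: t)
  | _ => false

def has_duplicates_2d_lst_alt (list_of_lists : List (List String)) : Bool :=
  let flat := PySem.List.sorted (list_of_lists.flatMap (fun sublist => sublist)) (fun x => x) false
  hdAdjB flat

-- ===== PRECONDITION & SPEC =====
def Spec_has_duplicates_2d_lst (list_of_lists : List (List String)) (out : Bool) : Prop := out = has_duplicates_2d_lst_alt list_of_lists
instance (list_of_lists : List (List String)) (out : Bool) : Decidable (Spec_has_duplicates_2d_lst list_of_lists out) := by unfold Spec_has_duplicates_2d_lst; infer_instance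

-- ===== CLAIM (what is proved, stated in full; the proofs are below) =====
def Claim_equal_has_duplicates_2d_lst : Prop := ∀ (list_of_lists : List (List String)), Dom_has_duplicates_2d_lst list_of_lists → Spec_has_duplicates_2d_lst list_of_lists (has_duplicates_2d_lst list_of_lists)

-- ===== LEMMAS AND PROOFS =====

-- A's loop flattened into a single scan over all items
def hdScan (seen : PySem.Set String) : List String → Bool
  | [] => false
  | x :: xs => if PySem.Set.contains seen x then true else hdScan (PySem.Set.add seen x) xs

theorem hd_scan_append (l ys : List String) (seen : PySem.Set String) :
    hdScan seen (l ++ ys) =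
      (match hdInnerA seen l with
       | none => true
       | some s => hdScan s ys) := by
  induction l generalizing seen with
  | nil => simp [hdInnerA]
  | cons x xs ih =>
    simp only [List.cons_append, hdScan, hdInnerA]
    split
    · rfl
    · exact ih _

theorem hd_outer_eq_scan (lls : List (List String)) (seen : PySem.Set String) :
    hdOuterA seen lls = hdScan seen (lls.flatMap (fun s => s)) := by
  induction lls generalizing seen with
  | nil => simp [hdOuterA, hdScan]
  | cons l ls ih =>
    simp only [hdOuterA, List.flatMap_cons, hd_scan_append]
    cases h : hdInnerA seen l with
    | none => simp
    | some s => simp [ih]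

-- A's scan says: the items so far are not all fresh-and-distinct
theorem hd_scan_eq_decide (xs : List String) (seen : PySem.Set String) :
    hdScan seen xs = decide (¬ xs.Nodup ∨ ∃ x ∈ xs, x ∈ seen) := by
  induction xs generalizing seen with
  | nil => simp [hdScan]
  | cons x rest ih =>
    simp only [hdScan]
    by_cases hx : x ∈ seen
    · rw [if_pos (by simpa [PySem.Set.contains] using hx)]
      exact (decide_eq_true (Or.inr ⟨x, List.mem_cons_self, hx⟩)).symm
    · rw [if_neg (by simpa [PySem.Set.contains] using hx)]
      rw [ih]
      have hadd : PySem.Set.add seen x = seen ++ [x] := by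
        unfold PySem.Set.add
        rw [if_neg (by simpa [PySem.Set.contains] using hx)]
      rw [hadd]
      congr 1
      rw [eq_iff_iff]
      constructor
      · rintro (h | ⟨y, hy, hys⟩)
        · exact Or.inl (fun hn => h hn.of_cons)
        · rcases List.mem_append.mp hys with hs | hx1
          · exact Or.inr ⟨y, List.mem_cons_of_mem _ hy, hs⟩
          · rcases List.mem_singleton.mp hx1 with rfl
            exact Or.inl (fun hn => (List.nodup_cons.mp hn).1 hy)
      · rintro (h | ⟨y, hy, hys⟩)
        · by_cases hxr : x ∈ rest
          · exact Or.inr ⟨x, hxr, List.mem_append.mpr (Or.inr (List.mem_singleton.mpr rfl))⟩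
          · exact Or.inl (fun hn => h (List.nodup_cons.mpr ⟨hxr, hn⟩))
        · rcases List.mem_cons.mp hy with rfl | hy'
          · exact absurd hys hx
          · exact Or.inr ⟨y, hy', List.mem_append.mpr (Or.inl hys)⟩

theorem hdA_eq_nodup (lls : List (List String)) :
    has_duplicates_2d_lst lls = decide (¬ (lls.flatMap (fun s => s)).Nodup) := by
  unfold has_duplicates_2d_lst
  rw [hd_outer_eq_scan, hd_scan_eq_decide]
  simp [PySem.Set.empty]

-- on a ≤-sorted list, an equal adjacent pair exists iff the list has a duplicate
theorem hdAdjB_eq_nodup (ys : List String) (hs : ys.Pairwise (· ≤ ·)) :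
    hdAdjB ys = decide (¬ ys.Nodup) := by
  induction ys with
  | nil => simp [hdAdjB]
  | cons x t ih =>
    cases t with
    | nil => simp [hdAdjB]
    | cons y t' =>
      rw [List.pairwise_cons] at hs
      obtain ⟨hx, hp'⟩ := hs
      have hyz : ∀ z ∈ t', y ≤ z := (List.pairwise_cons.mp hp').1
      have := ih hp'
      simp only [hdAdjB] at this ⊢
      by_cases hxy : x = y
      · subst hxy
        simp [List.nodup_cons]
      · rw [show (x == y) = false by simp [hxy], Bool.false_or, this]
        have hxlt : x < y := lt_of_le_of_ne (hx y List.mem_cons_self) hxy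
        have hxnot : x ∉ y :: t' := by
          intro hm
          rcases List.mem_cons.mp hm with rfl | hxm
          · exact hxy rfl
          · exact absurd (hyz x hxm) (not_le_of_gt hxlt)
        congr 1
        rw [eq_iff_iff]
        constructor
        · intro h hn; exact h hn.of_cons
        · intro h hn; exact h (List.nodup_cons.mpr ⟨hxnot, hn⟩)

-- ===== VERDICT (by name: the statement is the Claim_ definition above) =====
theorem has_duplicates_2d_lst_spec : Claim_equal_has_duplicates_2d_lst := by
  intro lls _
  unfold Spec_has_duplicates_2d_lst has_duplicates_2d_lst_alt
  rw [hdA_eq_nodup,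
    hdAdjB_eq_nodup _ (by simpa using PySem.List.sorted_pairwise (lls.flatMap (fun s => s)) (fun x => x))]
  congr 1
  simp only [eq_iff_iff, not_iff_not]
  exact (PySem.List.sorted_perm (lls.flatMap (fun s => s)) (fun x => x) false).nodup_iff.symm
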